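-- pv_equiv track=rewrite | github.com/DrDLP/olaf | lyrics_visuals/text_waveform.py | _split_words_with_indices
-- ===== SOURCE A (Python) =====
-- from typing import Any, Dict, List, Optional, Tuple
--
-- def _split_words_with_indices(text: str) -> List[Tuple[str, int, int]]:
--     """
--     Split text into (word, start_char, end_char) using whitespace
--     as separator. The indices refer to the original string.
--     """
--     results: List[Tuple[str, int, int]] = []
--     if not text:
--         return results
--
--     start = 0
--     length = len(text)
--     i = 0
--     while i < length:
--         # Skip leading spaces
--         while i < length and text[i].isspace():
--             i += 1
--         if i >= length:
--             break
--         word_start = i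
--         while i < length and not text[i].isspace():
--             i += 1
--         word_end = i
--         word = text[word_start:word_end]
--         if word:
--             results.append((word, word_start, word_end))
--     return results
-- ===== SOURCE B (Python) =====
-- from typing import Any, Dict, List, Optional, Tuple
--
-- def _split_words_with_indices(text: str) -> List[Tuple[str, int, int]]:
--     """Single flat pass: a state machine over enumerate(text) tracking the
--     start of the current word; flush on whitespace and at the end."""
--     results: List[Tuple[str, int, int]] = []
--     cur: Optional[int] = None
--     for i, ch in enumerate(text):
--         if ch.isspace():
--             if cur is not None:
--                 results.append((text[cur:i], cur, i))
--                 cur = None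
--         else:
--             if cur is None:
--                 cur = i
--     if cur is not None:
--         results.append((text[cur:len(text)], cur, len(text)))
--     return results
-- ===== Notes on version B (the rewrite author's own statement) =====
-- stated objective: simpler
-- what changed: Replaced A's nested index-based while loops (skip-spaces scan, then word scan, with manual slicing bounds) by a single flat for-loop state machine over enumerate(text) that tracks the current word's start and flushes on whitespace and at the end.
import Mathlib
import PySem

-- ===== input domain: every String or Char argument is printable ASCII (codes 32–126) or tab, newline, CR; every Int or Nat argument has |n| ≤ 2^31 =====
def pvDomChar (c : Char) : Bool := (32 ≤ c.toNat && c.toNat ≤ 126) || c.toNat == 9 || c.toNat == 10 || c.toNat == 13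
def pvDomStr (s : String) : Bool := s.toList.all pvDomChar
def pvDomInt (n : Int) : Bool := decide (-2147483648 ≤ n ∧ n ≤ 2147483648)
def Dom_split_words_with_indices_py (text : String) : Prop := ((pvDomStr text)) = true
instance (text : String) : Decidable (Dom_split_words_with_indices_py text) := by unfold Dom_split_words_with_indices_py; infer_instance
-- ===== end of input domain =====

-- B is a simpler single flat pass (a state machine over enumerate) instead of A's nested index-scanning while loops; return values proved equal on all domain strings.

-- ===== PORT A =====
-- inner 'while i < length and text[i].isspace(): i += 1' (fuel = enough loop steps; cs.length suffices)
def pvASkip (cs : List Char) : Nat → Nat → Nat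
  | 0, i => i
  | fuel + 1, i =>
    if h : i < cs.length then
      if PySem.Chars.isspace cs[i] then pvASkip cs fuel (i + 1) else i
    else i

-- inner 'while i < length and not text[i].isspace(): i += 1'
def pvAWord (cs : List Char) : Nat → Nat → Nat
  | 0, i => i
  | fuel + 1, i =>
    if h : i < cs.length then
      if PySem.Chars.isspace cs[i] then i else pvAWord cs fuel (i + 1)
    else i

-- outer 'while i < length: …' (each iteration strictly advances i, so cs.length steps of fuel suffice)
def pvALoop (cs : List Char) : Nat → Nat → List (String × Int × Int)
  | 0, _ => []
  | fuel + 1, i =>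
    if i < cs.length then
      let j := pvASkip cs cs.length i
      if j < cs.length then
        let k := pvAWord cs cs.length j
        let word := String.ofList (PySem.List.slice cs (some (j : Int)) (some (k : Int)))
        (if word ≠ "" then [(word, (j : Int), (k : Int))] else []) ++ pvALoop cs fuel k
      else []
    else []

def split_words_with_indices_py (text : String) : List (String × Int × Int) :=
  if text = "" then [] else pvALoop text.toList text.toList.length 0

-- ===== PORT B =====
-- loop body of Source B's single for-loop over enumerate(text)
def pvBStep (cs : List Char) (st : List (String × Int × Int) × Option Int)
    (p : Int × Char) : List (String × Int × Int) × Option Int :=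
  if PySem.Chars.isspace p.2 then
    match st.2 with
    | some s => (st.1 ++ [(String.ofList (PySem.List.slice cs (some s) (some p.1)), s, p.1)], none)
    | none => st
  else
    match st.2 with
    | none => (st.1, some p.1)
    | some _ => st

-- final flush after the loop
def pvBFinish (cs : List Char) (st : List (String × Int × Int) × Option Int) :
    List (String × Int × Int) :=
  match st.2 with
  | some s => st.1 ++ [(String.ofList (PySem.List.slice cs (some s) (some (cs.length : Int))), s, (cs.length : Int))]
  | none => st.1

def split_words_with_indices_py_alt (text : String) : List (String × Int × Int) :=
  pvBFinish text.toList ((PySem.List.enumerate text.toList 0).foldl (pvBStep text.toList) ([], none))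

-- ===== PRECONDITION & SPEC =====
def Spec_split_words_with_indices_py (text : String) (out : List (String × Int × Int)) : Prop := out = split_words_with_indices_py_alt text
instance (text : String) (out : List (String × Int × Int)) : Decidable (Spec_split_words_with_indices_py text out) := by unfold Spec_split_words_with_indices_py; infer_instance

-- ===== CLAIM (what is proved, stated in full; the proofs are below) =====
def Claim_equal_split_words_with_indices_py : Prop := ∀ (text : String), Dom_split_words_with_indices_py text → Spec_split_words_with_indices_py text (split_words_with_indices_py text)

-- ===== LEMMAS AND PROOFS =====

theorem pvASkip_big (cs : List Char) : ∀ f i, cs.length ≤ i → pvASkip cs f i = i := by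
  intro f
  induction f with
  | zero => intro i _; rfl
  | succ f ih => intro i h; simp [pvASkip, show ¬ i < cs.length by omega]

theorem pvASkip_ge (cs : List Char) : ∀ f i, i ≤ pvASkip cs f i := by
  intro f
  induction f with
  | zero => intro i; simp [pvASkip]
  | succ f ih =>
    intro i
    simp only [pvASkip]
    split
    · split
      · exact le_trans (by omega) (ih (i + 1))
      · omega
    · omega

theorem pvASkip_fuel (cs : List Char) : ∀ f i g, cs.length ≤ i + f → cs.length ≤ i + g →
    pvASkip cs f i = pvASkip cs g i := by
  intro f
  induction f with
  | zero => intro i g hf hg; rw [pvASkip, pvASkip_big cs g i (by omega)]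
  | succ f ih =>
    intro i g hf hg
    by_cases h : i < cs.length
    · obtain ⟨g', rfl⟩ : ∃ g', g = g' + 1 := ⟨g - 1, by omega⟩
      simp only [pvASkip, h, dif_pos]
      split
      · exact ih (i + 1) g' (by omega) (by omega)
      · rfl
    · rw [pvASkip_big cs _ i (by omega), pvASkip_big cs _ i (by omega)]

theorem pvASkip_stop (cs : List Char) : ∀ f i, cs.length ≤ i + f → ∀ h : pvASkip cs f i < cs.length,
    ¬ PySem.Chars.isspace cs[pvASkip cs f i] := by
  intro f
  induction f with
  | zero => intro i hf h; rw [pvASkip] at h; omega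
  | succ f ih =>
    intro i hf h
    by_cases hi : i < cs.length
    · by_cases hs : PySem.Chars.isspace cs[i]
      · have he : pvASkip cs (f + 1) i = pvASkip cs f (i + 1) := by simp [pvASkip, hi, hs]
        intro hc
        exact ih (i + 1) (by omega) (he ▸ h) (by simpa [he] using hc)
      · have he : pvASkip cs (f + 1) i = i := by simp [pvASkip, hi, hs]
        intro hc
        exact hs (by simpa [he] using hc)
    · rw [pvASkip_big cs _ i (by omega)] at h; omega

theorem pvASkip_space (cs : List Char) (i : Nat) (h : i < cs.length)
    (hs : PySem.Chars.isspace cs[i]) :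
    pvASkip cs cs.length i = pvASkip cs cs.length (i + 1) := by
  rw [pvASkip_fuel cs cs.length i (cs.length - i) (by omega) (by omega)]
  obtain ⟨m, hm⟩ : ∃ m, cs.length - i = m + 1 := ⟨cs.length - i - 1, by omega⟩
  rw [hm]
  simp only [pvASkip, h, dif_pos, hs, if_pos]
  exact pvASkip_fuel cs m (i + 1) cs.length (by omega) (by omega)

theorem pvASkip_nonspace (cs : List Char) (i : Nat)
    (hs : ¬ (i < cs.length ∧ PySem.Chars.isspace (cs.getD i ' '))) :
    pvASkip cs cs.length i = i := by
  by_cases h : i < cs.length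
  · have hns : ¬ PySem.Chars.isspace cs[i] := by
      intro hc; exact hs ⟨h, by simpa [List.getD, List.getElem?_eq_getElem h] using hc⟩
    rw [pvASkip_fuel cs cs.length i (cs.length - i) (by omega) (by omega)]
    obtain ⟨m, hm⟩ : ∃ m, cs.length - i = m + 1 := ⟨cs.length - i - 1, by omega⟩
    rw [hm]
    simp [pvASkip, h, hns]
  · exact pvASkip_big cs _ i (by omega)

theorem pvAWord_big (cs : List Char) : ∀ f i, cs.length ≤ i → pvAWord cs f i = i := by
  intro f
  induction f with
  | zero => intro i _; rfl
  | succ f ih => intro i h; simp [pvAWord, show ¬ i < cs.length by omega]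

theorem pvAWord_ge (cs : List Char) : ∀ f i, i ≤ pvAWord cs f i := by
  intro f
  induction f with
  | zero => intro i; simp [pvAWord]
  | succ f ih =>
    intro i
    simp only [pvAWord]
    split
    · split
      · omega
      · exact le_trans (by omega) (ih (i + 1))
    · omega

theorem pvAWord_fuel (cs : List Char) : ∀ f i g, cs.length ≤ i + f → cs.length ≤ i + g →
    pvAWord cs f i = pvAWord cs g i := by
  intro f
  induction f with
  | zero => intro i g hf hg; rw [pvAWord, pvAWord_big cs g i (by omega)]
  | succ f ih =>
    intro i g hf hg
    by_cases h : i < cs.length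
    · obtain ⟨g', rfl⟩ : ∃ g', g = g' + 1 := ⟨g - 1, by omega⟩
      simp only [pvAWord, h, dif_pos]
      split
      · rfl
      · exact ih (i + 1) g' (by omega) (by omega)
    · rw [pvAWord_big cs _ i (by omega), pvAWord_big cs _ i (by omega)]

theorem pvAWord_space (cs : List Char) (i : Nat) (h : i < cs.length)
    (hs : PySem.Chars.isspace cs[i]) : pvAWord cs cs.length i = i := by
  rw [pvAWord_fuel cs cs.length i (cs.length - i) (by omega) (by omega)]
  obtain ⟨m, hm⟩ : ∃ m, cs.length - i = m + 1 := ⟨cs.length - i - 1, by omega⟩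
  rw [hm]
  simp [pvAWord, h, hs]

theorem pvAWord_step (cs : List Char) (i : Nat) (h : i < cs.length)
    (hs : ¬ PySem.Chars.isspace cs[i]) :
    pvAWord cs cs.length i = pvAWord cs cs.length (i + 1) := by
  rw [pvAWord_fuel cs cs.length i (cs.length - i) (by omega) (by omega)]
  obtain ⟨m, hm⟩ : ∃ m, cs.length - i = m + 1 := ⟨cs.length - i - 1, by omega⟩
  rw [hm]
  simp only [pvAWord, h, dif_pos, hs, if_neg, Bool.not_eq_true]
  · exact pvAWord_fuel cs m (i + 1) cs.length (by omega) (by omega)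

theorem pvAWord_gt (cs : List Char) (i : Nat) (h : i < cs.length)
    (hs : ¬ PySem.Chars.isspace cs[i]) : i < pvAWord cs cs.length i := by
  rw [pvAWord_step cs i h hs]
  have := pvAWord_ge cs cs.length (i + 1)
  omega

theorem pvALoop_succ (cs : List Char) (f i : Nat) :
    pvALoop cs (f + 1) i =
      (if i < cs.length then
        if pvASkip cs cs.length i < cs.length then
          (if String.ofList (PySem.List.slice cs (some ((pvASkip cs cs.length i) : Int))
                (some ((pvAWord cs cs.length (pvASkip cs cs.length i)) : Int))) ≠ "" then
            [(String.ofList (PySem.List.slice cs (some ((pvASkip cs cs.length i) : Int))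
                (some ((pvAWord cs cs.length (pvASkip cs cs.length i)) : Int))),
              ((pvASkip cs cs.length i) : Int), ((pvAWord cs cs.length (pvASkip cs cs.length i)) : Int))]
          else []) ++ pvALoop cs f (pvAWord cs cs.length (pvASkip cs cs.length i))
        else []
      else []) := rfl

theorem pvALoop_big (cs : List Char) : ∀ f i, cs.length ≤ i → pvALoop cs f i = [] := by
  intro f
  induction f with
  | zero => intro i _; rfl
  | succ f ih => intro i h; simp [pvALoop, show ¬ i < cs.length by omega]

theorem pvALoop_fuel (cs : List Char) : ∀ f i g, cs.length ≤ i + f → cs.length ≤ i + g →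
    pvALoop cs f i = pvALoop cs g i := by
  intro f
  induction f with
  | zero => intro i g hf hg; rw [pvALoop, pvALoop_big cs g i (by omega)]
  | succ f ih =>
    intro i g hf hg
    by_cases h : i < cs.length
    · obtain ⟨g', rfl⟩ : ∃ g', g = g' + 1 := ⟨g - 1, by omega⟩
      simp only [pvALoop, h, if_pos]
      by_cases hj : pvASkip cs cs.length i < cs.length
      · simp only [hj, if_pos]
        have hge := pvASkip_ge cs cs.length i
        have hgt := pvAWord_gt cs (pvASkip cs cs.length i) hj (pvASkip_stop cs cs.length i (by omega) hj)
        rw [ih (pvAWord cs cs.length (pvASkip cs cs.length i)) g' (by omega) (by omega)]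
      · simp [hj]
    · rw [pvALoop_big cs _ i (by omega), pvALoop_big cs _ i (by omega)]

theorem pvALoop_space (cs : List Char) (i : Nat) (h : i < cs.length)
    (hs : PySem.Chars.isspace cs[i]) :
    pvALoop cs cs.length i = pvALoop cs cs.length (i + 1) := by
  have hskip := pvASkip_space cs i h hs
  by_cases h' : i + 1 < cs.length
  · rw [pvALoop_fuel cs cs.length i (cs.length - i) (by omega) (by omega),
      pvALoop_fuel cs cs.length (i + 1) (cs.length - i - 1) (by omega) (by omega)]
    obtain ⟨m, hm⟩ : ∃ m, cs.length - i - 1 = m + 1 := ⟨cs.length - i - 2, by omega⟩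
    rw [hm, show cs.length - i = (m + 1) + 1 by omega,
      pvALoop_succ cs (m + 1) i, pvALoop_succ cs m (i + 1)]
    simp only [h, if_pos, h', hskip]
    by_cases hj : pvASkip cs cs.length (i + 1) < cs.length
    · simp only [hj, if_pos]
      have hge := pvASkip_ge cs cs.length (i + 1)
      have hgt := pvAWord_gt cs (pvASkip cs cs.length (i + 1)) hj
        (pvASkip_stop cs cs.length (i + 1) (by omega) hj)
      rw [pvALoop_fuel cs (m + 1) (pvAWord cs cs.length (pvASkip cs cs.length (i + 1))) m
        (by omega) (by omega)]
    · simp [hj]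
  · have hstop : pvASkip cs cs.length (i + 1) = i + 1 := pvASkip_nonspace cs (i + 1) (by omega)
    rw [pvALoop_big cs cs.length (i + 1) (by omega),
      pvALoop_fuel cs cs.length i (cs.length - i) (by omega) (by omega)]
    obtain ⟨m, hm⟩ : ∃ m, cs.length - i = m + 1 := ⟨cs.length - i - 1, by omega⟩
    rw [hm]
    simp [pvALoop, h, hskip, hstop, show ¬ i + 1 < cs.length from h']

theorem pvALoop_word (cs : List Char) (i : Nat) (h : i < cs.length)
    (hs : ¬ PySem.Chars.isspace cs[i]) :
    pvALoop cs cs.length i =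
      (String.ofList (PySem.List.slice cs (some (i : Int)) (some ((pvAWord cs cs.length i) : Int))),
        (i : Int), ((pvAWord cs cs.length i) : Int)) :: pvALoop cs cs.length (pvAWord cs cs.length i) := by
  have hskip : pvASkip cs cs.length i = i := by
    apply pvASkip_nonspace
    intro ⟨_, hc⟩
    exact hs (by simpa [List.getD, List.getElem?_eq_getElem h] using hc)
  have hgt := pvAWord_gt cs i h hs
  rw [pvALoop_fuel cs cs.length i (cs.length - i) (by omega) (by omega)]
  obtain ⟨m, hm⟩ : ∃ m, cs.length - i = m + 1 := ⟨cs.length - i - 1, by omega⟩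
  rw [hm]
  simp only [pvALoop, h, if_pos, hskip]
  have hword : String.ofList (PySem.List.slice cs (some (i : Int)) (some ((pvAWord cs cs.length i) : Int))) ≠ "" := by
    intro hc
    have hnil : PySem.List.slice cs (some (i : Int)) (some ((pvAWord cs cs.length i) : Int)) = [] := by
      have h2 := congrArg String.toList hc; simpa using h2
    rw [PySem.List.slice_natCast] at hnil
    have hlen := congrArg List.length hnil
    simp [List.length_take, List.length_drop] at hlen
    omega
  simp only [hword, ne_eq, not_false_iff, if_true]
  rw [pvALoop_fuel cs m (pvAWord cs cs.length i) cs.length (by omega) (by omega)]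
  simp

theorem pvMain (cs : List Char) : ∀ (xs : List Char) (i : Nat), i ≤ cs.length → cs.drop i = xs →
    (∀ acc, pvBFinish cs (List.foldl (pvBStep cs) (acc, none) (PySem.List.enumerate xs (i : Int))) =
      acc ++ pvALoop cs cs.length i) ∧
    (∀ (s : Nat) acc, pvBFinish cs (List.foldl (pvBStep cs) (acc, some (s : Int)) (PySem.List.enumerate xs (i : Int))) =
      acc ++ (String.ofList (PySem.List.slice cs (some (s : Int)) (some ((pvAWord cs cs.length i) : Int))),
        (s : Int), ((pvAWord cs cs.length i) : Int)) :: pvALoop cs cs.length (pvAWord cs cs.length i)) := by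
  intro xs
  induction xs with
  | nil =>
    intro i hle hd
    have hi : i = cs.length := by
      have := List.length_drop (l := cs) (i := i); rw [hd] at this; simp at this; omega
    subst hi
    constructor
    · intro acc
      simp [PySem.List.enumerate, pvBFinish, pvALoop_big cs cs.length cs.length (by omega)]
    · intro s acc
      rw [pvAWord_big cs cs.length cs.length (by omega)]
      simp [PySem.List.enumerate, pvBFinish, pvALoop_big cs cs.length cs.length (by omega)]
  | cons x xs ih =>
    intro i hle hd
    have hi : i < cs.length := by
      by_contra hc
      rw [List.drop_eq_nil_of_le (by omega)] at hd; simp at hd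
    have hx : cs[i] = x := by
      have := List.drop_eq_getElem_cons hi
      rw [hd] at this; exact ((List.cons.injEq _ _ _ _).mp this).1.symm
    have hd' : cs.drop (i + 1) = xs := by
      have := List.drop_eq_getElem_cons hi
      rw [hd] at this; exact ((List.cons.injEq _ _ _ _).mp this).2.symm
    have ih' := ih (i + 1) (by omega) hd'
    rw [PySem.List.enumerate_cons]
    have hcast : (i : Int) + 1 = ((i + 1 : Nat) : Int) := by push_cast; ring
    by_cases hs : PySem.Chars.isspace cs[i]
    · constructor
      · intro acc
        simp only [List.foldl_cons, pvBStep, hx ▸ hs, if_pos]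
        rw [hcast, ih'.1 acc, ← pvALoop_space cs i hi hs]
      · intro s acc
        simp only [List.foldl_cons, pvBStep, hx ▸ hs, if_pos]
        rw [hcast, ih'.1]
        rw [pvAWord_space cs i hi hs, ← pvALoop_space cs i hi hs]
        simp
    · have hw : pvAWord cs cs.length i = pvAWord cs cs.length (i + 1) := pvAWord_step cs i hi hs
      constructor
      · intro acc
        simp only [List.foldl_cons, pvBStep, hx ▸ hs, if_neg, Bool.not_eq_true]
        rw [hcast, ih'.2 i acc, pvALoop_word cs i hi hs, hw]
      · intro s acc
        simp only [List.foldl_cons, pvBStep, hx ▸ hs, if_neg, Bool.not_eq_true]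
        rw [hcast, ih'.2 s acc, hw]

-- ===== VERDICT (by name: the statement is the Claim_ definition above) =====
theorem split_words_with_indices_py_spec : Claim_equal_split_words_with_indices_py := by
  intro text _
  show split_words_with_indices_py text = split_words_with_indices_py_alt text
  have hmain := (pvMain text.toList text.toList 0 (by omega) (by simp)).1 []
  rw [split_words_with_indices_py, split_words_with_indices_py_alt]
  rw [show ((0 : Int)) = ((0 : Nat) : Int) by norm_num, hmain, List.nil_append]
  by_cases ht : text = ""
  · subst ht
    rw [if_pos rfl]
    rfl
  · rw [if_neg ht]
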